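-- pv_equiv track=rewrite | github.com/LucasSimpson/crs | adam.py | simplify_sign
-- ===== SOURCE A (Python) =====
-- def simplify(pair):
--     if pair == '--':
--         return '+'
--     if pair == '++':
--         return '+'
--     if pair == '-+':
--         return '-'
--     if pair == '+-':
--         return '-'
--
-- def simplify_sign(exp):
--     if len(exp) <= 1:
--         return exp
--     for i in range(len(exp) - 1):
--         if (exp[i] == '-' or exp[i] == '+') \
--                 and (exp[i+1] == '-' or exp[i+1] == '+'):
--             return exp[:i] + simplify_sign(simplify(exp[i:i+2]) + exp[i+2:])
--     return exp
-- ===== SOURCE B (Python) =====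
-- def simplify_sign(exp):
--     # One pass: each maximal run of '+'/'-' collapses to one sign by minus-parity.
--     out = []
--     i = 0
--     n = len(exp)
--     while i < n:
--         c = exp[i]
--         if c == '+' or c == '-':
--             minus = 0
--             while i < n and (exp[i] == '+' or exp[i] == '-'):
--                 if exp[i] == '-':
--                     minus += 1
--                 i += 1
--             out.append('-' if minus % 2 else '+')
--         else:
--             out.append(c)
--             i += 1
--     return ''.join(out)
-- ===== Notes on version B (the rewrite author's own statement) =====
-- stated objective: alternative
-- what changed: A repeatedly rescans from the start for the first adjacent '+'/'-' pair, collapses it with string slicing and recurses; B makes one left-to-right pass that collapses each maximal sign run into a single sign determined by the parity of its minus count.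
import Mathlib
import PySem

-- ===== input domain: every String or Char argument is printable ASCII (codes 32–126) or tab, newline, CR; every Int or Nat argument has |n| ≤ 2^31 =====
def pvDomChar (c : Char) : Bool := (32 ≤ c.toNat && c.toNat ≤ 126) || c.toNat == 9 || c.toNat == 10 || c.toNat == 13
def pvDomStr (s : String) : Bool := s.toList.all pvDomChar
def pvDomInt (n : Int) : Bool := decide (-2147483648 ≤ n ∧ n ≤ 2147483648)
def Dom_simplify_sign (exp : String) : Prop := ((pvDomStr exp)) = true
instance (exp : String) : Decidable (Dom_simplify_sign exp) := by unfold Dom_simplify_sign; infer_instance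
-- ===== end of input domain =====

-- B replaces A's find-first-pair-and-restart recursion by a single left-to-right pass that
-- collapses each maximal '+'/'-' run into one sign by minus-parity (objective: alternative).

-- ===== PORT A =====

-- Python `simplify(pair)`: the four two-character cases in order (the fall-through-to-None
-- branch is unreachable under the caller's guard and is ported as []).
def pvSimplifyPair (p : List Char) : List Char :=
  if p = ['-', '-'] then ['+']
  else if p = ['+', '+'] then ['+']
  else if p = ['-', '+'] then ['-']
  else if p = ['+', '-'] then ['-']
  else []

-- the `for i in range(len(exp)-1)` search for the first adjacent sign pair
def pvFindPair (l : List Char) (i : Nat) : Option Nat :=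
  if h : i + 1 < l.length then
    if (l[i] == '+' || l[i] == '-') && (l[i + 1] == '+' || l[i + 1] == '-') then some i
    else pvFindPair l (i + 1)
  else none
termination_by l.length - i

theorem pvFindPair_lt {l : List Char} {k i : Nat} (h : pvFindPair l k = some i) :
    i + 1 < l.length := by
  fun_induction pvFindPair l k with
  | case1 => simp_all; omega
  | case2 k h' hc ih => exact ih h
  | case3 => simp_all

def pvSimpA (l : List Char) : List Char :=
  if l.length ≤ 1 then l
  else
    match hfp : pvFindPair l 0 with
    | some i => l.take i ++ pvSimpA (pvSimplifyPair ((l.drop i).take 2) ++ l.drop (i + 2))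
    | none => l
termination_by l.length
decreasing_by
  have hi := pvFindPair_lt hfp
  have : (pvSimplifyPair ((l.drop i).take 2)).length ≤ 1 := by
    unfold pvSimplifyPair; split_ifs <;> simp
  simp only [List.length_append, List.length_drop]
  omega

def simplify_sign (exp : String) : String := String.ofList (pvSimpA exp.toList)

-- ===== PORT B =====

def pvIsSign (c : Char) : Bool := c == '+' || c == '-'

-- the outer while loop; a sign run is consumed at once (the inner while loop = takeWhile/
-- dropWhile and the minus counter = count '-') and replaced by its parity sign
def pvGoB : List Char → List Char
  | [] => []
  | c :: rest =>
    if pvIsSign c then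
      (if (List.takeWhile pvIsSign (c :: rest)).count '-' % 2 == 1 then '-' else '+')
        :: pvGoB (List.dropWhile pvIsSign (c :: rest))
    else c :: pvGoB rest
termination_by l => l.length
decreasing_by
  · simp_all [List.dropWhile]
    have := List.length_dropWhile_le pvIsSign rest
    omega
  · simp

def simplify_sign_alt (exp : String) : String := String.ofList (pvGoB exp.toList)

-- ===== PRECONDITION & SPEC =====
def Spec_simplify_sign (exp : String) (out : String) : Prop := out = simplify_sign_alt exp
instance (exp : String) (out : String) : Decidable (Spec_simplify_sign exp out) := by unfold Spec_simplify_sign; infer_instance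

-- ===== CLAIM (what is proved, stated in full; the proofs are below) =====
def Claim_equal_simplify_sign : Prop := ∀ (exp : String), Dom_simplify_sign exp → Spec_simplify_sign exp (simplify_sign exp)

-- ===== LEMMAS AND PROOFS =====

-- no two adjacent sign characters
def pvNoAdj (a b : Char) : Prop := ¬(pvIsSign a = true ∧ pvIsSign b = true)

theorem pvSign_cases {c : Char} (h : pvIsSign c = true) : c = '+' ∨ c = '-' := by
  simp [pvIsSign] at h; exact h

-- a single sign character is its own parity sign
theorem pvParity_single {c : Char} (h : pvIsSign c = true) :
    (if List.count '-' [c] % 2 == 1 then '-' else '+') = c := by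
  rcases pvSign_cases h with rfl | rfl <;> decide

-- a list with no adjacent sign pair is returned unchanged by the single pass
theorem pvGoB_id : ∀ u : List Char, List.IsChain pvNoAdj u → pvGoB u = u := by
  intro u
  induction u with
  | nil => intro _; rw [pvGoB]
  | cons c u' ih =>
    intro hch
    by_cases hs : pvIsSign c
    · cases u' with
      | nil =>
        rw [pvGoB]
        simp [hs, List.takeWhile, List.dropWhile, pvGoB]
        rcases pvSign_cases hs with rfl | rfl <;> decide
      | cons d u'' =>
        have hd : pvIsSign d = false := by
          have := (List.isChain_cons_cons.mp hch).1
          simp [pvNoAdj, hs] at this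
          simpa using this
        rw [pvGoB]
        simp only [hs, if_pos]
        rw [List.takeWhile, List.dropWhile]
        simp only [hs, List.takeWhile, List.dropWhile, hd]
        rw [pvParity_single hs, ih (List.isChain_cons_cons.mp hch).2]
    · rw [pvGoB]
      simp only [hs, Bool.false_eq_true, if_neg, not_false_iff]
      rw [ih hch.tail]
  
-- the pass distributes over a pair-free prefix that ends in a non-sign character
theorem pvGoB_split : ∀ (u v : List Char), List.IsChain pvNoAdj u →
    (∀ x, u.getLast? = some x → pvIsSign x = false) → pvGoB (u ++ v) = u ++ pvGoB v := by
  intro u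
  induction u with
  | nil => intro v _ _; simp
  | cons c u' ih =>
    intro v hch hlast
    cases u' with
    | nil =>
      have hc : pvIsSign c = false := hlast c rfl
      rw [List.cons_append, List.nil_append, pvGoB]
      simp [hc]
    | cons d u'' =>
      have hlast' : ∀ x, (d :: u'').getLast? = some x → pvIsSign x = false := by
        intro x hx; exact hlast x (by simpa using hx)
      by_cases hs : pvIsSign c
      · have hd : pvIsSign d = false := by
          have := (List.isChain_cons_cons.mp hch).1
          simp [pvNoAdj, hs] at this
          simpa using this
        rw [List.cons_append, pvGoB]
        simp only [hs, if_pos]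
        rw [List.takeWhile, List.dropWhile]
        simp only [hs, List.cons_append, List.takeWhile, List.dropWhile, hd]
        rw [pvParity_single hs]
        have ih' := ih v (List.isChain_cons_cons.mp hch).2 hlast'
        simp only [List.cons_append] at ih' ⊢
        rw [ih']
      · rw [List.cons_append, pvGoB]
        simp only [hs, Bool.false_eq_true, if_neg, not_false_iff]
        have ih' := ih v hch.tail hlast'
        simp only [List.cons_append] at ih' ⊢
        rw [ih']

-- collapsing the first two signs of a run preserves the pass's output
theorem pvPair_collapse {a b : Char} (w : List Char)
    (ha : pvIsSign a = true) (hb : pvIsSign b = true) :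
    pvGoB (a :: b :: w) = pvGoB ((if a = b then '+' else '-') :: w) := by
  rcases pvSign_cases ha with rfl | rfl <;> rcases pvSign_cases hb with rfl | rfl <;>
    · rw [pvGoB]
      conv_rhs => rw [pvGoB]
      simp [pvIsSign]
      try rw [show ∀ m : ℕ, (m + 1 + 1) % 2 = m % 2 from fun m => by omega]

-- what a successful search returns: the FIRST adjacent sign pair
theorem pvFindPair_some {l : List Char} {k i : Nat} (h : pvFindPair l k = some i) :
    k ≤ i ∧ ∃ (hi : i + 1 < l.length),
      pvIsSign l[i] = true ∧ pvIsSign l[i+1] = true ∧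
      ∀ j, k ≤ j → j < i → ∀ (hj : j + 1 < l.length),
        ¬(pvIsSign l[j] = true ∧ pvIsSign l[j+1] = true) := by
  fun_induction pvFindPair l k with
  | case1 k hk hc =>
    simp only [Option.some.injEq] at h
    subst h
    simp only [pvIsSign]
    refine ⟨le_refl _, hk, ?_, ?_, ?_⟩ <;> simp_all
  | case2 k hk hc ih =>
    obtain ⟨hki, hi, h1, h2, hmin⟩ := ih h
    refine ⟨by omega, hi, h1, h2, ?_⟩
    intro j hkj hji hj hpair
    rcases Nat.eq_or_lt_of_le hkj with rfl | hlt
    · exact hc (by simp [pvIsSign] at hpair ⊢; exact ⟨hpair.1, hpair.2⟩)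
    · exact hmin j hlt hji hj hpair
  | case3 => simp_all

-- a failed search means no adjacent sign pair at any index ≥ k
theorem pvFindPair_none {l : List Char} {k : Nat} (h : pvFindPair l k = none) :
    ∀ j, k ≤ j → ∀ (hj : j + 1 < l.length),
      ¬(pvIsSign l[j] = true ∧ pvIsSign l[j+1] = true) := by
  fun_induction pvFindPair l k with
  | case1 => simp_all
  | case2 k hk hc ih =>
    intro j hkj hj hpair
    rcases Nat.eq_or_lt_of_le hkj with rfl | hlt
    · exact hc (by simp [pvIsSign] at hpair ⊢; exact ⟨hpair.1, hpair.2⟩)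
    · exact ih h j hlt hj hpair
  | case3 k hk =>
    intro j hkj hj hpair
    omega


theorem pvMainAux : ∀ (n : Nat) (l : List Char), l.length ≤ n → pvSimpA l = pvGoB l := by
  intro n
  induction n with
  | zero =>
    intro l hl
    have hnil : l = [] := List.eq_nil_of_length_eq_zero (by omega)
    subst hnil
    rw [pvSimpA, pvGoB]; simp
  | succ n ih =>
    intro l hl
    rw [pvSimpA]
    split
    · -- len(exp) <= 1: A returns exp; the pass also leaves it unchanged
      next h1 =>
      symm
      apply pvGoB_id
      rcases l with _ | ⟨c, _ | ⟨d, t⟩⟩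
      · simp
      · simp
      · simp at h1
    · next h1 =>
      split
      · -- a first adjacent sign pair exists at index i
        next i heq =>
        obtain ⟨-, hi, ha, hb, hmin⟩ := pvFindPair_some heq
        have hdrop : l.drop i = l[i] :: l[i+1] :: l.drop (i + 2) := by
          rw [List.drop_eq_getElem_cons (show i < l.length by omega)]
          congr 1
          exact List.drop_eq_getElem_cons hi
        have htake2 : (l.drop i).take 2 = [l[i], l[i+1]] := by
          rw [hdrop]; rfl
        have hsp : pvSimplifyPair [l[i], l[i+1]] =
            [if l[i] = l[i+1] then '+' else '-'] := by
          rcases pvSign_cases ha with h | h <;> rcases pvSign_cases hb with h' | h' <;>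
            rw [h, h'] <;> decide
        have hlen : (((if l[i] = l[i+1] then '+' else '-') :: l.drop (i + 2)).length) ≤ n := by
          simp only [List.length_cons, List.length_drop]
          omega
        rw [htake2, hsp, List.singleton_append, ih _ hlen]
        have hchain : List.IsChain pvNoAdj (l.take i) := by
          rw [List.isChain_iff_getElem]
          intro j hj
          have hjlen : (l.take i).length = i := by
            simp only [List.length_take]; omega
          have hj' : j + 1 < i := by omega
          have := hmin j (Nat.zero_le j) (by omega) (by omega)
          simpa [pvNoAdj, List.getElem_take] using this
        have hlast : ∀ x, (l.take i).getLast? = some x → pvIsSign x = false := by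
          intro x hx
          rcases Nat.eq_zero_or_pos i with rfl | hpos
          · simp at hx
          · have hjlen : (l.take i).length = i := by
              simp only [List.length_take]; omega
            rw [List.getLast?_eq_getElem?, hjlen, List.getElem?_eq_getElem (by omega),
              List.getElem_take] at hx
            have := hmin (i - 1) (Nat.zero_le _) (by omega) (by omega)
            have hix : l[i - 1 + 1] = l[i] := by congr 1; omega
            rw [hix] at this
            have hxl : x = l[i - 1]'(by omega) := by injection hx with h; exact h.symm
            subst hxl
            cases hxs : pvIsSign (l[i - 1]'(by omega))
            · rfl
            · exact absurd ⟨hxs, ha⟩ this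
        conv_rhs => rw [← List.take_append_drop i l, hdrop]
        rw [pvGoB_split (l.take i) _ hchain hlast, pvPair_collapse _ ha hb]
      · -- no adjacent sign pair: A returns exp; the pass leaves it unchanged
        next heq =>
        symm
        apply pvGoB_id
        rw [List.isChain_iff_getElem]
        intro j hj
        have := pvFindPair_none heq j (Nat.zero_le j) hj
        simpa [pvNoAdj] using this

theorem pvMain : ∀ l : List Char, pvSimpA l = pvGoB l :=
  fun l => pvMainAux l.length l (le_refl _)

-- ===== VERDICT (by name: the statement is the Claim_ definition above) =====
theorem simplify_sign_spec : Claim_equal_simplify_sign := by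
  intro exp _
  unfold Spec_simplify_sign simplify_sign simplify_sign_alt
  rw [pvMain]
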